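-- pv_equiv track=rewrite | github.com/Starry331/Daydream-cli | src/daydream/chat.py | _iter_body_chunks
-- ===== SOURCE A (Python) =====
-- def _iter_body_chunks(text: str) -> list[str]:
--     chunks: list[str] = []
--     line_visible_count = 0
--     index = 0
--     length = len(text)
--
--     while index < length:
--         char = text[index]
--         if char == "\n":
--             chunks.append("\n")
--             line_visible_count = 0
--             index += 1
--             continue
--
--         if line_visible_count < 32:
--             chunk_size = 1
--         elif line_visible_count < 96:
--             chunk_size = 2
--         else:
--             chunk_size = 3
--
--         end = min(length, index + chunk_size)
--         newline_index = text.find("\n", index, end)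
--         if newline_index != -1:
--             end = newline_index
--         if end == index:
--             chunks.append("\n")
--             line_visible_count = 0
--             index += 1
--             continue
--
--         chunk = text[index:end]
--         chunks.append(chunk)
--         line_visible_count += len(chunk)
--         index = end
--
--     return chunks
-- ===== SOURCE B (Python) =====
-- def _iter_body_chunks(text: str) -> list[str]:
--     chunks: list[str] = []
--     lines = text.split("\n")
--     last = len(lines) - 1
--     for i, line in enumerate(lines):
--         pos = 0
--         length = len(line)
--         while pos < length:
--             size = 1 if pos < 32 else 2 if pos < 96 else 3
--             end = min(length, pos + size)
--             chunks.append(line[pos:end])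
--             pos = end
--         if i != last:
--             chunks.append("\n")
--     return chunks
-- ===== Notes on version B (the rewrite author's own statement) =====
-- stated objective: simpler
-- what changed: A walks the whole text with one index-driven while loop, re-deriving line state and probing for newline characters inside each chunk window with text.find; B first splits the text into lines, then chunks each line with a plain position-keyed loop and emits one newline separator after every line but the last, so the per-chunk in-window newline search and the visible-count reset logic disappear.
import Mathlib
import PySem

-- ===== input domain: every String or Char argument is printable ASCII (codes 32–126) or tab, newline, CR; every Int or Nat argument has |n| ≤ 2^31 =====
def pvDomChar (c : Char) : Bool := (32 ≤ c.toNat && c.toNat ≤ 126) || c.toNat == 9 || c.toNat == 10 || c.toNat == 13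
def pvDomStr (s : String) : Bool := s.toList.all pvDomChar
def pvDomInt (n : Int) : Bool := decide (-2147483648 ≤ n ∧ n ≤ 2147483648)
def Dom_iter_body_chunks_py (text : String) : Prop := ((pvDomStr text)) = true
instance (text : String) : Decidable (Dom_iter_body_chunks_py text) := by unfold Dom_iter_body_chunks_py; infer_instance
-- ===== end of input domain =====

-- B replaces A's single index-driven while loop (with its in-window newline `find`) by a
-- split-on-"\n"-first decomposition: an outer pass over the lines and a plain per-line
-- chunking loop, with one "\n" emitted after every line but the last (objective: simpler).

-- ===== PORT A =====

-- termination helper for the while loop: a successful bounded `find` result is ≥ the start index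
theorem pvFindFromLB (cs : List Char) (i e0 : Nat) (hi : i ≤ e0) (he : e0 ≤ cs.length)
    (h : PySem.Chars.findFrom cs ['\n'] (i : Int) (some (e0 : Int)) ≠ -1) :
    (i : Int) ≤ PySem.Chars.findFrom cs ['\n'] (i : Int) (some (e0 : Int)) := by
  unfold PySem.Chars.findFrom at h ⊢
  have h1 : ¬ ((cs.length : Int) < (e0 : Int)) := by exact_mod_cast not_lt.mpr he
  have h2 : ¬ ((i : Int) < 0) := by simp
  have h3 : ¬ ((e0 : Int) < (i : Int)) := by exact_mod_cast not_lt.mpr hi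
  have h4 : ¬ ((e0 : Int) < 0) := by simp
  simp only [if_neg h1, if_neg h2, if_neg h3, if_neg h4, Int.toNat_natCast] at h ⊢
  by_cases h0 : PySem.Chars.find (List.drop i (List.take e0 cs)) ['\n'] = -1
  · simp [h0] at h
  · simp only [if_neg h0]
    have := PySem.Chars.neg_one_le_find (List.drop i (List.take e0 cs)) ['\n']
    omega

-- A's chunk_size rule: 1 below 32 visible chars, 2 below 96, else 3
def pySizeA (count : Nat) : Nat := if count < 32 then 1 else if count < 96 then 2 else 3


-- A's  end = min(length, index+size); if text.find("\n", index, end) != -1: end = that index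
def pyFindEnd (cs : List Char) (index size : Nat) : Nat :=
  if PySem.Chars.findFrom cs ['\n'] (index : Int) (some ((min cs.length (index + size) : Nat) : Int)) ≠ -1
  then (PySem.Chars.findFrom cs ['\n'] (index : Int) (some ((min cs.length (index + size) : Nat) : Int))).toNat
  else min cs.length (index + size)

-- termination helper: the computed end never moves backwards
theorem pyFindEnd_lb (cs : List Char) (index size : Nat) (h : index < cs.length) :
    index ≤ pyFindEnd cs index size := by
  unfold pyFindEnd
  split_ifs with hni
  · have := pvFindFromLB cs index (min cs.length (index + size)) (by omega) (by omega) hni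
    omega
  · omega

-- the while loop of A, state (chunks, line_visible_count, index); index/end stay ≥ 0 in Python, kept as Nat
def iterLoop (cs : List Char) (chunks : List String) (count index : Nat) : List String :=
  if h : index < cs.length then
    let char := cs[index]
    if char = '\n' then
      iterLoop cs (chunks ++ ["\n"]) 0 (index + 1)
    else
      let size : Nat := pySizeA count
      let e : Nat := pyFindEnd cs index size
      if e = index then
        iterLoop cs (chunks ++ ["\n"]) 0 (index + 1)
      else
        let chunk : List Char := PySem.List.slice cs (some (index : Int)) (some (e : Int))
        iterLoop cs (chunks ++ [String.ofList chunk]) (count + chunk.length) e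
  else chunks
termination_by cs.length - index
decreasing_by
  · omega
  · omega
  · have h2 := pyFindEnd_lb cs index (pySizeA count) h
    have h4 : e = pyFindEnd cs index (pySizeA count) := rfl
    rename_i he
    rw [h4] at he
    omega

def iter_body_chunks_py (text : String) : List String :=
  iterLoop text.toList [] 0 0

-- ===== PORT B =====

-- B's size rule keyed on the position within the line
def pySizeB (pos : Nat) : Nat := if pos < 32 then 1 else if pos < 96 then 2 else 3

theorem pySizeB_pos (pos : Nat) : 1 ≤ pySizeB pos := by
  unfold pySizeB; split_ifs <;> omega

-- the inner while loop of B over positions in one (newline-free) line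
def chunkLine (line : List Char) (pos : Nat) (chunks : List String) : List String :=
  if pos < line.length then
    let size : Nat := pySizeB pos
    let e : Nat := min line.length (pos + size)
    chunkLine line e (chunks ++ [String.ofList (PySem.List.slice line (some (pos : Int)) (some (e : Int)))])
  else chunks
termination_by line.length - pos
decreasing_by
  have := pySizeB_pos pos
  omega

def iter_body_chunks_py_alt (text : String) : List String :=
  let lines := PySem.Chars.splitOn text.toList ['\n']
  let last : Int := (lines.length : Int) - 1
  (PySem.List.enumerate lines).foldl
    (fun chunks p =>
      let chunks := chunkLine p.2 0 chunks
      if p.1 ≠ last then chunks ++ ["\n"] else chunks) []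

-- ===== PRECONDITION & SPEC =====
def Spec_iter_body_chunks_py (text : String) (out : List String) : Prop := out = iter_body_chunks_py_alt text
instance (text : String) (out : List String) : Decidable (Spec_iter_body_chunks_py text out) := by unfold Spec_iter_body_chunks_py; infer_instance

-- ===== CLAIM (what is proved, stated in full; the proofs are below) =====
def Claim_equal_iter_body_chunks_py : Prop := ∀ (text : String), Dom_iter_body_chunks_py text → Spec_iter_body_chunks_py text (iter_body_chunks_py text)

-- ===== LEMMAS AND PROOFS =====

theorem pySizeA_pos (count : Nat) : 1 ≤ pySizeA count := by
  unfold pySizeA; split_ifs <;> omega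

-- the chunk A cuts from the current suffix r at visible count c
def chunkOf (r : List Char) (c : Nat) : List Char :=
  (r.take (pySizeA c)).takeWhile (fun x => x ≠ '\n')

theorem chunkOf_cons_length (ch : Char) (rs : List Char) (c : Nat) (hch : ch ≠ '\n') :
    1 ≤ (chunkOf (ch :: rs) c).length := by
  unfold chunkOf pySizeA
  split_ifs <;> simp [List.takeWhile, hch]

-- `render r c`: what A's loop emits from the remaining suffix r with visible count c
def render (r : List Char) (c : Nat) : List String :=
  match r with
  | [] => []
  | ch :: rs =>
    if hch : ch = '\n' then "\n" :: render rs 0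
    else
      String.ofList (chunkOf (ch :: rs) c) ::
        render ((ch :: rs).drop (chunkOf (ch :: rs) c).length) (c + (chunkOf (ch :: rs) c).length)
termination_by r.length
decreasing_by
  · simp only [List.length_cons]; omega
  · have := chunkOf_cons_length ch rs c hch
    simp only [List.length_drop, List.length_cons]
    omega

-- one-step unfoldings of render
theorem render_nil (c : Nat) : render [] c = [] := by rw [render]

theorem render_nl (t : List Char) (c : Nat) : render ('\n' :: t) c = "\n" :: render t 0 := by
  rw [render]; simp

theorem render_step (r : List Char) (c : Nat) (hne : r ≠ []) (hh : ∀ x ∈ r.head?, x ≠ '\n') :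
    render r c = String.ofList (chunkOf r c) ::
      render (r.drop (chunkOf r c).length) (c + (chunkOf r c).length) := by
  cases r with
  | nil => exact absurd rfl hne
  | cons ch rs =>
    have hch : ch ≠ '\n' := hh ch (by simp)
    rw [render]
    simp [hch]

-- B's and A's size rules agree
theorem pySizeBA (p : Nat) : pySizeB p = pySizeA p := rfl

-- the chunk cut from d ++ rest never crosses into rest when rest is empty or starts with '\n'
theorem chunk_cross (d rest : List Char) (hnd : '\n' ∉ d)
    (hr : rest = [] ∨ ∃ t, rest = '\n' :: t) (s : Nat) :
    ((d ++ rest).take s).takeWhile (fun x => x ≠ '\n') = d.take s := by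
  have hall : ∀ a ∈ d, (fun x => decide (x ≠ '\n')) a = true := by
    intro a ha
    simp only [decide_eq_true_eq]
    exact fun hx => hnd (hx ▸ ha)
  rw [List.take_append]
  by_cases hs : s ≤ d.length
  · have h0 : s - d.length = 0 := by omega
    rw [h0, List.take_zero, List.append_nil]
    exact List.takeWhile_eq_self_iff.mpr (fun a ha => hall a (List.mem_of_mem_take ha))
  · have hds : d.take s = d := List.take_of_length_le (by omega)
    rw [hds, List.takeWhile_append_of_pos hall]
    rcases hr with rfl | ⟨t, rfl⟩
    · simp
    · have hk : ∃ m, s - d.length = m + 1 := ⟨s - d.length - 1, by omega⟩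
      obtain ⟨m, hm⟩ := hk
      rw [hm]
      simp [List.takeWhile]

-- find.go of "\n" in terms of takeWhile
theorem find_go_newline : ∀ (w : List Char) (k : Nat),
    PySem.Chars.find.go ['\n'] w k =
      if '\n' ∈ w then (((k + (w.takeWhile (fun x => x ≠ '\n')).length : Nat)) : Int) else -1 := by
  intro w
  induction w with
  | nil => intro k; simp [PySem.Chars.find.go]
  | cons c t ih =>
    intro k
    rw [PySem.Chars.find.go]
    by_cases hc : c = '\n'
    · subst hc
      simp [List.isPrefixOf, List.takeWhile]
    · have hpre : (['\n'] : List Char).isPrefixOf (c :: t) = false := by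
        simp [List.isPrefixOf]
        exact fun h => absurd h.symm hc
      rw [hpre]
      simp only [Bool.false_eq_true, if_false, ih (k + 1), List.mem_cons, List.takeWhile]
      have hd : (decide (c ≠ '\n')) = true := by simp [hc]
      rw [hd]
      simp only [List.length_cons]
      split_ifs with hmem hmem2 hmem2
      · push_cast; ring
      · exact absurd (Or.inr hmem) hmem2
      · rcases hmem2 with h1 | h2
        · exact absurd h1.symm hc
        · exact absurd h2 hmem
      · rfl

-- the computed end, characterised: index + length of the cut chunk
theorem pyFindEnd_eq (cs : List Char) (index size : Nat) (h : index < cs.length) :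
    pyFindEnd cs index size
      = index + (((cs.drop index).take size).takeWhile (fun x => x ≠ '\n')).length := by
  unfold pyFindEnd PySem.Chars.findFrom
  have h1 : ¬ ((cs.length : Int) < ((min cs.length (index + size) : Nat) : Int)) := by
    push_cast; omega
  have h2 : ¬ ((index : Int) < 0) := by simp
  have h3 : ¬ (((min cs.length (index + size) : Nat) : Int) < (index : Int)) := by
    push_cast; omega
  have h4 : ¬ (((min cs.length (index + size) : Nat) : Int) < 0) := by
    push_cast; omega
  simp only [if_neg h1, if_neg h2, if_neg h3, if_neg h4, Int.toNat_natCast]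
  have hw : List.drop index (List.take (min cs.length (index + size)) cs)
      = (cs.drop index).take size := by
    rw [List.drop_take]
    have h5 : min cs.length (index + size) - index = min (cs.drop index).length size := by
      simp only [List.length_drop]; omega
    rw [h5, min_comm, ← List.take_take, List.take_length]
  rw [hw]
  unfold PySem.Chars.find
  rw [find_go_newline _ 0]
  set w := (cs.drop index).take size with hwdef
  set k := (w.takeWhile (fun x => x ≠ '\n')).length with hkdef
  have hk0 : ((0 + k : Nat) : Int) = (k : Int) := by push_cast; ring
  rw [hk0]
  have hwlen : w.length = min (cs.length - index) size := by
    rw [hwdef, List.length_take, List.length_drop, min_comm]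
  by_cases hmem : '\n' ∈ w
  · simp only [if_pos hmem]
    have hne1 : ¬ ((k : Int) = -1) := by omega
    simp only [if_neg hne1]
    have hne2 : ((index : Int) + (k : Int)) ≠ -1 := by omega
    simp only [ne_eq, hne2, not_false_iff, if_pos]
    omega
  · simp only [if_neg hmem]
    norm_num
    have hself : w.takeWhile (fun x => x ≠ '\n') = w := by
      apply List.takeWhile_eq_self_iff.mpr
      intro a ha
      simp only [decide_eq_true_eq]
      intro hcon
      exact hmem (hcon ▸ ha)
    have : k = w.length := by rw [hkdef, hself]
    omega

-- A's loop renders the remaining suffix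
theorem iterLoop_eq_render (cs : List Char) :
    ∀ n index count chunks, cs.length - index ≤ n →
      iterLoop cs chunks count index = chunks ++ render (cs.drop index) count := by
  intro n
  induction n with
  | zero =>
    intro index count chunks h
    have hp : ¬ index < cs.length := by omega
    have hd : cs.drop index = [] := by rw [List.drop_eq_nil_iff]; omega
    rw [iterLoop]
    simp [hp, hd, render_nil]
  | succ n ih =>
    intro index count chunks h
    by_cases hp : index < cs.length
    · rw [iterLoop]
      simp only [dif_pos hp]
      by_cases hc : cs[index] = '\n'
      · simp only [if_pos hc]
        rw [ih (index + 1) 0 (chunks ++ ["\n"]) (by omega)]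
        rw [List.drop_eq_getElem_cons hp, hc, render_nl]
        simp
      · simp only [if_neg hc]
        have hget : cs.drop index = cs[index] :: cs.drop (index + 1) := List.drop_eq_getElem_cons hp
        have hE := pyFindEnd_eq cs index (pySizeA count) hp
        have hE' : pyFindEnd cs index (pySizeA count)
            = index + (chunkOf (cs.drop index) count).length := hE
        have hk1 : 1 ≤ (chunkOf (cs.drop index) count).length := by
          rw [hget]
          exact chunkOf_cons_length _ _ _ hc
        set k := (chunkOf (cs.drop index) count).length with hkdef
        have hkd : k ≤ (cs.drop index).length := by
          rw [hkdef]
          exact List.IsPrefix.length_le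
            ((List.takeWhile_prefix _).trans (List.take_prefix _ _))
        have hne : ¬ (pyFindEnd cs index (pySizeA count) = index) := by omega
        simp only [hE', if_neg (by omega : ¬ (index + k = index))]
        have hslice : PySem.List.slice cs (some (index : Int)) (some ((index + k : Nat) : Int))
            = (cs.drop index).take k := by
          rw [PySem.List.slice_natCast]
          have : index + k - index = k := by omega
          rw [this]
        have hchunkeq : chunkOf (cs.drop index) count = (cs.drop index).take k := by
          rw [hkdef]
          exact List.prefix_iff_eq_take.mp ((List.takeWhile_prefix _).trans (List.take_prefix _ _))
        have hlen : ((cs.drop index).take k).length = k := by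
          rw [List.length_take]; omega
        rw [hslice]
        rw [ih (index + k) (count + ((cs.drop index).take k).length) _ (by omega)]
        have hdd : cs.drop (index + k) = (cs.drop index).drop k := by
          rw [List.drop_drop]
        rw [hdd]
        have hdne : cs.drop index ≠ [] := by rw [hget]; exact List.cons_ne_nil _ _
        have hhx : (cs.drop index).head? = some cs[index] := by rw [hget]; rfl
        have hhead : ∀ x ∈ (cs.drop index).head?, x ≠ '\n' := by
          intro x hx
          rw [hhx] at hx
          simp only [Option.mem_some_iff] at hx
          subst hx
          exact hc
        conv_rhs => rw [render_step (cs.drop index) count hdne hhead]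
        rw [hlen, ← hkdef]
        simp [List.append_assoc, hchunkeq]
    · have hd : cs.drop index = [] := by rw [List.drop_eq_nil_iff]; omega
      rw [iterLoop]
      simp [hp, hd, render_nil]

-- B's inner loop appends to the accumulator
theorem chunkLine_acc (line : List Char) :
    ∀ n pos chunks, line.length - pos ≤ n →
      chunkLine line pos chunks = chunks ++ chunkLine line pos [] := by
  intro n
  induction n with
  | zero =>
    intro pos chunks h
    have hp : ¬ pos < line.length := by omega
    have e1 : chunkLine line pos [] = [] := by rw [chunkLine]; simp [hp]
    rw [chunkLine]
    simp [hp, e1]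
  | succ n ih =>
    intro pos chunks h
    by_cases hp : pos < line.length
    · rw [chunkLine]
      conv_rhs => rw [chunkLine]
      simp only [if_pos hp]
      have hs := pySizeB_pos pos
      have hfuel : line.length - min line.length (pos + pySizeB pos) ≤ n := by omega
      rw [ih _ (chunks ++ [String.ofList (PySem.List.slice line (some (pos : Int)) (some ((min line.length (pos + pySizeB pos) : Nat) : Int)))]) hfuel,
          ih _ ([] ++ [String.ofList (PySem.List.slice line (some (pos : Int)) (some ((min line.length (pos + pySizeB pos) : Nat) : Int)))]) hfuel]
      simp [List.append_assoc]
    · have e1 : chunkLine line pos [] = [] := by rw [chunkLine]; simp [hp]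
      rw [chunkLine]
      simp [hp, e1]

-- rendering one newline-free line followed by a separator-headed rest
theorem render_split (line rest : List Char) (hn : '\n' ∉ line)
    (hr : rest = [] ∨ ∃ t, rest = '\n' :: t) :
    ∀ n pos, line.length - pos ≤ n → pos ≤ line.length →
      render (line.drop pos ++ rest) pos = chunkLine line pos [] ++ render rest 0 := by
  intro n
  induction n with
  | zero =>
    intro pos hf hle
    have hp : ¬ pos < line.length := by omega
    have hd : line.drop pos = [] := by rw [List.drop_eq_nil_iff]; omega
    have hcl : chunkLine line pos [] = [] := by rw [chunkLine]; simp [hp]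
    rw [hd, List.nil_append, hcl, List.nil_append]
    rcases hr with rfl | ⟨t, rfl⟩
    · rw [render_nil, render_nil]
    · rw [render_nl, render_nl]
  | succ n ih =>
    intro pos hf hle
    by_cases hp : pos < line.length
    · have hdne : line.drop pos ≠ [] := by simp [List.drop_eq_nil_iff]; omega
      have hhead : ∀ x ∈ (line.drop pos ++ rest).head?, x ≠ '\n' := by
        intro x hx
        cases hD : line.drop pos with
        | nil => exact absurd hD hdne
        | cons a t =>
          rw [hD, List.cons_append] at hx
          simp only [List.head?_cons, Option.mem_some_iff] at hx
          subst hx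
          exact fun hc => hn (hc ▸ List.mem_of_mem_drop (hD ▸ List.mem_cons_self))
      have hnd : '\n' ∉ line.drop pos := fun hx => hn (List.mem_of_mem_drop hx)
      rw [render_step _ _ (by simp [hdne]) hhead]
      have hchunk : chunkOf (line.drop pos ++ rest) pos = (line.drop pos).take (pySizeA pos) :=
        chunk_cross _ _ hnd hr _
      set s := pySizeA pos with hsdef
      have hs1 : 1 ≤ s := pySizeA_pos pos
      have hdl : (line.drop pos).length = line.length - pos := List.length_drop
      set k := ((line.drop pos).take s).length with hkdef
      have hkmin : k = min s (line.length - pos) := by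
        rw [hkdef, List.length_take, hdl]
      have hk1 : 1 ≤ k := by omega
      have hkd : k ≤ line.length - pos := by omega
      have hdropk : (line.drop pos ++ rest).drop ((chunkOf (line.drop pos ++ rest) pos).length)
          = line.drop (pos + k) ++ rest := by
        rw [hchunk, ← hkdef, List.drop_append]
        have h0 : k - (line.drop pos).length = 0 := by omega
        rw [h0, List.drop_zero, List.drop_drop]
      rw [hdropk, hchunk, ← hkdef]
      rw [ih (pos + k) (by omega) (by omega)]
      -- now unfold one step of chunkLine on the right
      conv_rhs => rw [chunkLine]
      simp only [if_pos hp]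
      have he : min line.length (pos + pySizeB pos) = pos + k := by
        rw [pySizeBA, ← hsdef]; omega
      rw [he]
      have hslice : PySem.List.slice line (some (pos : Int)) (some ((pos + k : Nat) : Int))
          = (line.drop pos).take s := by
        rw [PySem.List.slice_natCast]
        have : pos + k - pos = k := by omega
        rw [this]
        have htk : (line.drop pos).take k = (line.drop pos).take s := by
          rw [hkdef]
          exact (List.prefix_iff_eq_take.mp (List.take_prefix s (line.drop pos))).symm
        rw [htk]
      rw [hslice]
      simp only [List.nil_append]
      rw [chunkLine_acc line line.length (pos + k)
            [String.ofList (List.take s (List.drop pos line))] (by omega)]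
      simp
    · have hd : line.drop pos = [] := by rw [List.drop_eq_nil_iff]; omega
      have hcl : chunkLine line pos [] = [] := by rw [chunkLine]; simp [hp]
      rw [hd, List.nil_append, hcl, List.nil_append]
      rcases hr with rfl | ⟨t, rfl⟩
      · rw [render_nil, render_nil]
      · rw [render_nl, render_nl]

-- first-principles split of A's input on '\n'
def nlSplit : List Char → List (List Char)
  | [] => [[]]
  | c :: r => if c = '\n' then [] :: nlSplit r
              else match nlSplit r with
                   | [] => [[c]]
                   | p :: ps => (c :: p) :: ps

theorem nlSplit_ne_nil (cs : List Char) : nlSplit cs ≠ [] := by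
  induction cs with
  | nil => simp [nlSplit]
  | cons c r ih =>
    simp only [nlSplit]
    split_ifs
    · simp
    · cases h : nlSplit r <;> simp

theorem splitOn_go_eq :
    ∀ (fuel : Nat) (l cur : List Char) (acc : List (List Char)), l.length < fuel →
      PySem.Chars.splitOn.go ['\n'] fuel l cur acc
        = acc.reverse ++ (nlSplit l).modifyHead (cur.reverse ++ ·) := by
  intro fuel
  induction fuel with
  | zero => intro l cur acc h; omega
  | succ fuel ih =>
    intro l cur acc h
    cases l with
    | nil =>
      rw [PySem.Chars.splitOn.go]
      · simp [nlSplit]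
      · omega
    | cons c rest =>
      by_cases hc : c = '\n'
      · subst hc
        rw [PySem.Chars.splitOn.go]
        have hpre : (['\n'] : List Char).isPrefixOf ('\n' :: rest) = true := by
          simp [List.isPrefixOf]
        rw [hpre]
        simp only [if_pos]
        have hfuel : rest.length < fuel := by simp at h; omega
        rw [show (List.drop (['\n'] : List Char).length ('\n' :: rest)) = rest by simp]
        rw [ih rest [] (List.reverse cur :: acc) hfuel]
        rcases hp : nlSplit rest with _ | ⟨p, ps⟩
        · exact absurd hp (nlSplit_ne_nil rest)
        · simp [nlSplit, hp]
      · rw [PySem.Chars.splitOn.go]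
        have hpre : (['\n'] : List Char).isPrefixOf (c :: rest) = false := by
          simp [List.isPrefixOf]
          exact fun hx => absurd hx.symm hc
        rw [hpre]
        simp only [Bool.false_eq_true, if_false]
        have hfuel : rest.length < fuel := by simp at h; omega
        rw [ih rest (c :: cur) acc hfuel]
        rcases hp : nlSplit rest with _ | ⟨p, ps⟩
        · exact absurd hp (nlSplit_ne_nil rest)
        · simp [nlSplit, hc, hp]

theorem splitOn_eq_nlSplit (cs : List Char) : PySem.Chars.splitOn cs ['\n'] = nlSplit cs := by
  unfold PySem.Chars.splitOn
  rw [splitOn_go_eq (cs.length + 1) cs [] [] (by omega)]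
  rcases hp : nlSplit cs with _ | ⟨p, ps⟩
  · exact absurd hp (nlSplit_ne_nil cs)
  · simp

-- joining the split parts back with newlines
def nlJoin : List (List Char) → List Char
  | [] => []
  | [l] => l
  | l :: ls => l ++ '\n' :: nlJoin ls

theorem nlJoin_nlSplit (cs : List Char) : nlJoin (nlSplit cs) = cs := by
  induction cs with
  | nil => simp [nlSplit, nlJoin]
  | cons c r ih =>
    by_cases hc : c = '\n'
    · subst hc
      simp only [nlSplit, if_pos rfl]
      rcases hp : nlSplit r with _ | ⟨p, ps⟩
      · exact absurd hp (nlSplit_ne_nil r)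
      · rw [hp] at ih
        simp [nlJoin, ih]
    · simp only [nlSplit, if_neg hc]
      rcases hp : nlSplit r with _ | ⟨p, ps⟩
      · exact absurd hp (nlSplit_ne_nil r)
      · rw [hp] at ih
        cases ps with
        | nil => simp_all [nlJoin]
        | cons q qs => simp_all [nlJoin]

theorem nlSplit_no_nl (cs : List Char) : ∀ l ∈ nlSplit cs, '\n' ∉ l := by
  induction cs with
  | nil =>
    intro l hl
    simp [nlSplit] at hl
    simp [hl]
  | cons c r ih =>
    intro l hl
    by_cases hc : c = '\n'
    · rw [show nlSplit (c :: r) = [] :: nlSplit r by simp [nlSplit, hc]] at hl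
      rcases List.mem_cons.mp hl with h | h
      · simp [h]
      · exact ih l h
    · rcases hp : nlSplit r with _ | ⟨p, ps⟩
      · exact absurd hp (nlSplit_ne_nil r)
      · rw [show nlSplit (c :: r) = (c :: p) :: ps by simp [nlSplit, hc, hp]] at hl
        rcases List.mem_cons.mp hl with h | h
        · subst h
          simp only [List.mem_cons]
          push_neg
          refine ⟨fun hx => hc hx.symm, ?_⟩
          intro hx
          exact (ih p (hp ▸ List.mem_cons_self)) hx
        · exact ih l (hp ▸ List.mem_cons_of_mem p h)

-- B's outer loop, recursively
def interleave : List (List Char) → List String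
  | [] => []
  | [l] => chunkLine l 0 []
  | l :: ls => chunkLine l 0 [] ++ "\n" :: interleave ls

theorem render_interleave :
    ∀ lines : List (List Char), lines ≠ [] → (∀ l ∈ lines, '\n' ∉ l) →
      render (nlJoin lines) 0 = interleave lines := by
  intro lines
  induction lines with
  | nil => intro h; exact absurd rfl h
  | cons l ls ih =>
    intro _ hnl
    cases ls with
    | nil =>
      show render (nlJoin [l]) 0 = interleave [l]
      rw [show nlJoin [l] = l.drop 0 ++ [] by simp [show nlJoin [l] = l from rfl],
          show interleave [l] = chunkLine l 0 [] from rfl]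
      rw [render_split l [] (hnl l List.mem_cons_self) (Or.inl rfl) l.length 0 (by omega) (by omega)]
      rw [show render [] 0 = [] by rw [render]]
      simp
    | cons l2 ls2 =>
      rw [show nlJoin (l :: l2 :: ls2) = l.drop 0 ++ ('\n' :: nlJoin (l2 :: ls2)) by
            simp [show nlJoin (l :: l2 :: ls2) = l ++ '\n' :: nlJoin (l2 :: ls2) from rfl]]
      rw [render_split l ('\n' :: nlJoin (l2 :: ls2)) (hnl l List.mem_cons_self)
            (Or.inr ⟨nlJoin (l2 :: ls2), rfl⟩) l.length 0 (by omega) (by omega)]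
      rw [show render ('\n' :: nlJoin (l2 :: ls2)) 0 = "\n" :: render (nlJoin (l2 :: ls2)) 0 by rw [render]; simp]
      rw [ih (by simp) (fun x hx => hnl x (List.mem_cons_of_mem l hx))]
      rfl

theorem fold_enum_interleave :
    ∀ (lines : List (List Char)) (k last : Int) (chunks : List String),
      lines ≠ [] → last = k + lines.length - 1 →
      (PySem.List.enumerate lines k).foldl
        (fun chunks p =>
          let chunks := chunkLine p.2 0 chunks
          if p.1 ≠ last then chunks ++ ["\n"] else chunks) chunks
        = chunks ++ interleave lines := by
  intro lines
  induction lines with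
  | nil => intro k last chunks h; exact absurd rfl h
  | cons l ls ih =>
    intro k last chunks _ hlast
    rw [PySem.List.enumerate_cons]
    cases ls with
    | nil =>
      have hkl : k = last := by
        push_cast [List.length_cons, List.length_nil] at hlast; omega
      simp only [List.foldl_cons, List.foldl_nil]
      rw [show PySem.List.enumerate ([] : List (List Char)) (k + 1) = [] from rfl]
      simp only [List.foldl_nil]
      have : ¬ (k ≠ last) := by omega
      simp only [this, if_neg, ite_not, if_pos, hkl, ne_eq, not_true_eq_false, Bool.false_eq_true, if_false]
      rw [chunkLine_acc l l.length 0 chunks (by omega)]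
      rfl
    | cons l2 ls2 =>
      simp only [List.foldl_cons]
      have hk : k ≠ last := by
        push_cast [List.length_cons] at hlast; omega
      simp only [ne_eq, hk, not_false_iff, if_pos]
      rw [ih (k + 1) last _ (by simp) (by push_cast [List.length_cons] at hlast ⊢; omega)]
      rw [chunkLine_acc l l.length 0 chunks (by omega)]
      show chunks ++ chunkLine l 0 [] ++ ["\n"] ++ interleave (l2 :: ls2)
          = chunks ++ (chunkLine l 0 [] ++ "\n" :: interleave (l2 :: ls2))
      simp [List.append_assoc]

-- ===== VERDICT (by name: the statement is the Claim_ definition above) =====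
theorem iter_body_chunks_py_spec : Claim_equal_iter_body_chunks_py := by
  intro text _
  unfold Spec_iter_body_chunks_py iter_body_chunks_py iter_body_chunks_py_alt
  set cs := text.toList with hcs
  rw [iterLoop_eq_render cs cs.length 0 0 [] (by omega)]
  rw [splitOn_eq_nlSplit]
  rw [fold_enum_interleave (nlSplit cs) 0 (((nlSplit cs).length : Int) - 1) [] (nlSplit_ne_nil cs) (by push_cast; ring)]
  simp only [List.nil_append]
  rw [← render_interleave (nlSplit cs) (nlSplit_ne_nil cs) (nlSplit_no_nl cs),
    nlJoin_nlSplit, List.drop_zero]
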